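-- pv_equiv track=rewrite | github.com/pypi-data/pypi-mirror-124 | packages/ccmodel/ccmodel-0.1.1-py3-none-any.whl/ccmodel/utils/code_utils.py | get_bracketed_list_items
-- ===== SOURCE A (Python) =====
-- def get_bracketed_list_items(split_text: str, split_chars: str) -> str:
--     increase = "<([{"
--     decrease = ">)]}"
--     blevel = -1
--     items = [[]]
--     for char in split_text:
--         if char in increase:
--             blevel += 1
--             continue
--         elif char in decrease:
--             blevel -= 1
--             continue
--         elif char == "," and blevel == 0:
--             items[-1] = "".join(items[-1]).strip()
--             items.append([])
--             continue
--         else: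
--             items[-1].append(char)
--             continue
--     if items[-1] == []:
--         items.pop()
--     else:
--         items[-1] = "".join(items[-1]).strip()
--     return items
-- ===== SOURCE B (Python) =====
-- def get_bracketed_list_items(split_text: str, split_chars: str) -> str:
--     brackets = "<([{>)]}"
--     # pass 1: indices of commas at top bracket level (level counted from -1)
--     level = -1
--     cuts = []
--     for i, ch in enumerate(split_text):
--         if ch in "<([{":
--             level += 1
--         elif ch in ">)]}":
--             level -= 1
--         elif ch == "," and level == 0:
--             cuts.append(i)
--     # pass 2: cut into segments between the commas
--     segments = []
--     start = 0
--     for c in cuts: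
--         segments.append(split_text[start:c])
--         start = c + 1
--     segments.append(split_text[start:])
--     # drop bracket characters, strip whitespace
--     items = [''.join(ch for ch in seg if ch not in brackets).strip() for seg in segments]
--     # the last segment is dropped only when it has no non-bracket characters at all
--     if not any(ch not in brackets for ch in segments[-1]):
--         items.pop()
--     return items
-- ===== Notes on version B (the rewrite author's own statement) =====
-- stated objective: alternative
-- what changed: A's single stateful loop (growing the current item character by character and finalising it at each top-level comma) is replaced by two passes: first record the indices of all commas at bracket level 0, then slice the text into segments at those indices and clean each segment by filtering out bracket characters and stripping whitespace, dropping the last item only when its segment has no non-bracket character.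
import Mathlib
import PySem

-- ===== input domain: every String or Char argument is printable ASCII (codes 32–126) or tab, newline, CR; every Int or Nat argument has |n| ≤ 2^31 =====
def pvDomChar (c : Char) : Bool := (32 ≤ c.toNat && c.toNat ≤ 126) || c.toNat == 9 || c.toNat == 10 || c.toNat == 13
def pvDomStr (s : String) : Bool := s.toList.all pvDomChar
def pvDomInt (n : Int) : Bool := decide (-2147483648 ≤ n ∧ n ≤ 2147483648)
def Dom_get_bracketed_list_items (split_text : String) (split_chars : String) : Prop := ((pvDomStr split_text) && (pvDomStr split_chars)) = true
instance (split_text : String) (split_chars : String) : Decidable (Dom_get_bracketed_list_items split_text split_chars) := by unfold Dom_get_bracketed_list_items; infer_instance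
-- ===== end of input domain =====

-- B replaces A's single stateful loop by two passes (record top-level comma indices, then cut
-- and clean the segments); same return value, objective: alternative decomposition.

-- ===== PORT A =====
def pvInc : List Char := "<([{".toList
def pvDec : List Char := ">)]}".toList

-- A's loop; state: remaining chars, blevel, finished items (strings), current item (char list, = items[-1])
def pvLoopA : List Char → Int → List String → List Char → List String
  | [], _, acc, cur => if cur = [] then acc else acc ++ [String.ofList (PySem.Chars.strip cur)]
  | c :: cs, b, acc, cur =>
    if pvInc.contains c then pvLoopA cs (b + 1) acc cur
    else if pvDec.contains c then pvLoopA cs (b - 1) acc cur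
    else if c = ',' ∧ b = 0 then pvLoopA cs b (acc ++ [String.ofList (PySem.Chars.strip cur)]) []
    else pvLoopA cs b acc (cur ++ [c])

def get_bracketed_list_items (split_text : String) (split_chars : String) : List String :=
  pvLoopA split_text.toList (-1) [] []

-- ===== PORT B =====
def pvBr : List Char := "<([{>)]}".toList

-- pass 1: indices of commas seen at level 0 (for i, ch in enumerate(...))
def pvCutsB : List Char → Int → Nat → List Nat
  | [], _, _ => []
  | c :: cs, lvl, i =>
    if pvInc.contains c then pvCutsB cs (lvl + 1) (i + 1)
    else if pvDec.contains c then pvCutsB cs (lvl - 1) (i + 1)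
    else if c = ',' ∧ lvl = 0 then i :: pvCutsB cs lvl (i + 1)
    else pvCutsB cs lvl (i + 1)

-- pass 2: split_text[start:c] for each cut, then the tail split_text[start:].
-- indices here are in-range naturals, so Python's slice is exactly drop/take.
def pvSegsB (T : List Char) : List Nat → Nat → List (List Char)
  | [], start => [T.drop start]
  | k :: ks, start => (T.drop start).take (k - start) :: pvSegsB T ks (k + 1)

def get_bracketed_list_items_alt (split_text : String) (split_chars : String) : List String :=
  let T := split_text.toList
  let segments := pvSegsB T (pvCutsB T (-1) 0) 0
  let items := segments.map (fun seg => String.ofList (PySem.Chars.strip (seg.filter (fun c => !(pvBr.contains c)))))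
  if (segments.getLastD []).any (fun c => !(pvBr.contains c)) then items else items.dropLast

-- ===== PRECONDITION & SPEC =====
def Spec_get_bracketed_list_items (split_text : String) (split_chars : String) (out : List String) : Prop := out = get_bracketed_list_items_alt split_text split_chars
instance (split_text : String) (split_chars : String) (out : List String) : Decidable (Spec_get_bracketed_list_items split_text split_chars out) := by unfold Spec_get_bracketed_list_items; infer_instance

-- ===== CLAIM (what is proved, stated in full; the proofs are below) =====
def Claim_equal_get_bracketed_list_items : Prop := ∀ (split_text : String) (split_chars : String), Dom_get_bracketed_list_items split_text split_chars → Spec_get_bracketed_list_items split_text split_chars (get_bracketed_list_items split_text split_chars)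

-- ===== LEMMAS AND PROOFS =====

-- common reference splitter: segments (brackets still inside) between top-level commas
def pvConsHead (c : Char) : List (List Char) → List (List Char)
  | [] => [[c]]
  | s :: rest => (c :: s) :: rest

def pvSplit : List Char → Int → List (List Char)
  | [], _ => [[]]
  | c :: cs, b =>
    if pvInc.contains c then pvConsHead c (pvSplit cs (b + 1))
    else if pvDec.contains c then pvConsHead c (pvSplit cs (b - 1))
    else if c = ',' ∧ b = 0 then [] :: pvSplit cs b
    else pvConsHead c (pvSplit cs b)

def pvCollect (s : List Char) : List Char := s.filter (fun c => !(pvBr.contains c))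

def pvMkStrip (l : List Char) : String := String.ofList (PySem.Chars.strip l)

def pvPack (acc : List String) : List (List Char) → List String
  | [] => acc
  | [l] => if l = [] then acc else acc ++ [pvMkStrip l]
  | l :: l' :: ls => pvPack (acc ++ [pvMkStrip l]) (l' :: ls)

theorem pvConsHead_ne_nil (c : Char) (L : List (List Char)) : pvConsHead c L ≠ [] := by
  cases L <;> simp [pvConsHead]

theorem pvSplit_ne_nil (cs : List Char) : ∀ (b : Int), pvSplit cs b ≠ [] := by
  induction cs with
  | nil => intro b; simp [pvSplit]
  | cons c cs ih =>
    intro b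
    simp only [pvSplit]
    split_ifs with h1 h2 h3
    · exact pvConsHead_ne_nil _ _
    · exact pvConsHead_ne_nil _ _
    · simp
    · exact pvConsHead_ne_nil _ _

theorem pvBr_contains (c : Char) : pvBr.contains c = (pvInc.contains c || pvDec.contains c) := by
  have h : pvBr = pvInc ++ pvDec := by decide
  rw [h, List.contains_append]

theorem pvCollect_bracket (c : Char) (s : List Char)
    (h : pvInc.contains c = true ∨ pvDec.contains c = true) :
    pvCollect (c :: s) = pvCollect s := by
  have hb : c ∈ pvBr := by
    rw [← List.contains_iff_mem, pvBr_contains]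
    rcases h with h | h
    · rw [h, Bool.true_or]
    · rw [h, Bool.or_true]
  simp [pvCollect, hb]

theorem pvCollect_keep (c : Char) (s : List Char)
    (h1 : ¬ pvInc.contains c = true) (h2 : ¬ pvDec.contains c = true) :
    pvCollect (c :: s) = c :: pvCollect s := by
  have hb : c ∉ pvBr := by
    intro hm
    rw [← List.contains_iff_mem, pvBr_contains] at hm
    rcases Bool.or_eq_true_iff.mp hm with h | h
    · exact h1 h
    · exact h2 h
  simp [pvCollect, hb]

theorem pvLoopA_inc (c : Char) (cs : List Char) (b : Int) (acc : List String) (cur : List Char)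
    (h : pvInc.contains c = true) :
    pvLoopA (c :: cs) b acc cur = pvLoopA cs (b + 1) acc cur := by
  simp only [pvLoopA]; rw [if_pos h]

theorem pvLoopA_dec (c : Char) (cs : List Char) (b : Int) (acc : List String) (cur : List Char)
    (h1 : ¬ pvInc.contains c = true) (h2 : pvDec.contains c = true) :
    pvLoopA (c :: cs) b acc cur = pvLoopA cs (b - 1) acc cur := by
  simp only [pvLoopA]; rw [if_neg h1, if_pos h2]

theorem pvLoopA_comma (c : Char) (cs : List Char) (b : Int) (acc : List String) (cur : List Char)
    (h1 : ¬ pvInc.contains c = true) (h2 : ¬ pvDec.contains c = true) (h3 : c = ',' ∧ b = 0) :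
    pvLoopA (c :: cs) b acc cur = pvLoopA cs b (acc ++ [String.ofList (PySem.Chars.strip cur)]) [] := by
  simp only [pvLoopA]; rw [if_neg h1, if_neg h2, if_pos h3]

theorem pvLoopA_other (c : Char) (cs : List Char) (b : Int) (acc : List String) (cur : List Char)
    (h1 : ¬ pvInc.contains c = true) (h2 : ¬ pvDec.contains c = true) (h3 : ¬ (c = ',' ∧ b = 0)) :
    pvLoopA (c :: cs) b acc cur = pvLoopA cs b acc (cur ++ [c]) := by
  simp only [pvLoopA]; rw [if_neg h1, if_neg h2, if_neg h3]

theorem pvA_eq (cs : List Char) : ∀ (b : Int) (acc : List String) (cur : List Char)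
    (s : List Char) (rest : List (List Char)), pvSplit cs b = s :: rest →
    pvLoopA cs b acc cur = pvPack acc ((cur ++ pvCollect s) :: rest.map pvCollect) := by
  induction cs with
  | nil =>
    intro b acc cur s rest h
    simp only [pvSplit] at h
    injection h with h1 h2
    subst h1; subst h2
    simp [pvLoopA, pvPack, pvCollect, pvMkStrip]
  | cons c cs ih =>
    intro b acc cur s rest h
    simp only [pvSplit] at h
    by_cases hinc : pvInc.contains c = true
    · have hm : c ∈ pvInc := List.mem_of_elem_eq_true hinc
      rw [if_pos hinc] at h
      obtain ⟨s', rest', hsp⟩ : ∃ s' rest', pvSplit cs (b + 1) = s' :: rest' := by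
        cases hx : pvSplit cs (b + 1) with
        | nil => exact absurd hx (pvSplit_ne_nil cs (b + 1))
        | cons a l => exact ⟨a, l, rfl⟩
      rw [hsp] at h; simp only [pvConsHead] at h
      injection h with h1 h2
      subst h1; subst h2
      rw [pvLoopA_inc c cs b acc cur hinc]
      rw [ih (b + 1) acc cur s' rest' hsp, pvCollect_bracket c s' (Or.inl hinc)]
    · by_cases hdec : pvDec.contains c = true
      · have hm : c ∈ pvDec := List.mem_of_elem_eq_true hdec
        rw [if_neg hinc, if_pos hdec] at h
        obtain ⟨s', rest', hsp⟩ : ∃ s' rest', pvSplit cs (b - 1) = s' :: rest' := by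
          cases hx : pvSplit cs (b - 1) with
          | nil => exact absurd hx (pvSplit_ne_nil cs (b - 1))
          | cons a l => exact ⟨a, l, rfl⟩
        rw [hsp] at h; simp only [pvConsHead] at h
        injection h with h1 h2
        subst h1; subst h2
        rw [pvLoopA_dec c cs b acc cur hinc hdec]
        rw [ih (b - 1) acc cur s' rest' hsp, pvCollect_bracket c s' (Or.inr hdec)]
      · by_cases hcm : c = ',' ∧ b = 0
        · rw [if_neg hinc, if_neg hdec, if_pos hcm] at h
          obtain ⟨s', rest', hsp⟩ : ∃ s' rest', pvSplit cs b = s' :: rest' := by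
            cases hx : pvSplit cs b with
            | nil => exact absurd hx (pvSplit_ne_nil cs b)
            | cons a l => exact ⟨a, l, rfl⟩
          rw [hsp] at h
          injection h with h1 h2
          subst h1; subst h2
          rw [pvLoopA_comma c cs b acc cur hinc hdec hcm]
          rw [ih b _ [] s' rest' hsp]
          simp [pvCollect, pvPack, pvMkStrip]
        · rw [if_neg hinc, if_neg hdec, if_neg hcm] at h
          obtain ⟨s', rest', hsp⟩ : ∃ s' rest', pvSplit cs b = s' :: rest' := by
            cases hx : pvSplit cs b with
            | nil => exact absurd hx (pvSplit_ne_nil cs b)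
            | cons a l => exact ⟨a, l, rfl⟩
          rw [hsp] at h; simp only [pvConsHead] at h
          injection h with h1 h2
          subst h1; subst h2
          rw [pvLoopA_other c cs b acc cur hinc hdec hcm]
          rw [ih b acc (cur ++ [c]) s' rest' hsp, pvCollect_keep c s' hinc hdec]
          simp

theorem pvCuts_ge (cs : List Char) : ∀ (b : Int) (i : Nat) (k : Nat),
    k ∈ pvCutsB cs b i → i ≤ k := by
  induction cs with
  | nil => intro b i k h; simp [pvCutsB] at h
  | cons c cs ih =>
    intro b i k h
    simp only [pvCutsB] at h
    split_ifs at h with h1 h2 h3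
    · exact Nat.le_of_succ_le (ih _ _ _ h)
    · exact Nat.le_of_succ_le (ih _ _ _ h)
    · rcases List.mem_cons.mp h with rfl | h
      · exact Nat.le_refl k
      · exact Nat.le_of_succ_le (ih _ _ _ h)
    · exact Nat.le_of_succ_le (ih _ _ _ h)

theorem pvSegs_cons (T : List Char) (ks : List Nat) (start : Nat) (c : Char) (cs : List Char)
    (hd : T.drop start = c :: cs) (hk : ∀ k ∈ ks, start + 1 ≤ k) :
    pvSegsB T ks start = pvConsHead c (pvSegsB T ks (start + 1)) := by
  have hd1 : T.drop (start + 1) = cs := by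
    have h' := congrArg List.tail hd
    simpa [List.tail_drop] using h'
  cases ks with
  | nil => simp [pvSegsB, pvConsHead, hd, hd1]
  | cons k ks =>
    have h1 : start + 1 ≤ k := hk k (List.mem_cons_self ..)
    simp only [pvSegsB, pvConsHead, hd, hd1]
    rw [show k - start = (k - (start + 1)) + 1 by omega, List.take_succ_cons]

theorem pvB_eq (cs : List Char) : ∀ (b : Int) (start : Nat) (T : List Char),
    T.drop start = cs → pvSegsB T (pvCutsB cs b start) start = pvSplit cs b := by
  induction cs with
  | nil => intro b start T h; simp [pvCutsB, pvSegsB, pvSplit, h]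
  | cons c cs ih =>
    intro b start T h
    have hd1 : T.drop (start + 1) = cs := by
      have h' := congrArg List.tail h
      simpa [List.tail_drop] using h'
    simp only [pvCutsB, pvSplit]
    split_ifs with h1 h2 h3
    · rw [pvSegs_cons T _ start c cs h (fun k hk => pvCuts_ge cs _ _ k hk),
        ih _ (start + 1) T hd1]
    · rw [pvSegs_cons T _ start c cs h (fun k hk => pvCuts_ge cs _ _ k hk),
        ih _ (start + 1) T hd1]
    · simp only [pvSegsB, Nat.sub_self, List.take_zero]
      rw [ih b (start + 1) T hd1]
    · rw [pvSegs_cons T _ start c cs h (fun k hk => pvCuts_ge cs _ _ k hk),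
        ih b (start + 1) T hd1]

theorem pvPack_eq (L : List (List Char)) : ∀ acc, L ≠ [] →
    pvPack acc L = acc ++ (if L.getLastD [] = ([] : List Char) then (L.map pvMkStrip).dropLast else L.map pvMkStrip) := by
  induction L with
  | nil => intro acc h; exact absurd rfl h
  | cons l L ih =>
    intro acc _
    cases L with
    | nil =>
      by_cases hl : l = ([] : List Char) <;> simp [pvPack, hl]
    | cons l' L' =>
      rw [show pvPack acc (l :: l' :: L') = pvPack (acc ++ [pvMkStrip l]) (l' :: L') from rfl]
      rw [ih (acc ++ [pvMkStrip l]) (by simp)]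
      have hlast : (l :: l' :: L').getLastD ([] : List Char) = (l' :: L').getLastD ([] : List Char) := by
        simp
      rw [hlast]
      by_cases hc : (l' :: L').getLast?.getD ([] : List Char) = ([] : List Char) <;>
        simp [List.getLastD_eq_getLast?, hc]

theorem pvCollect_getLastD (L : List (List Char)) :
    (L.map pvCollect).getLastD [] = pvCollect (L.getLastD []) := by
  induction L with
  | nil => simp [pvCollect]
  | cons l L ih =>
    cases L with
    | nil => simp
    | cons l' L' => simpa [List.getLastD_cons] using ih

-- ===== VERDICT (by name: the statement is the Claim_ definition above) =====
theorem get_bracketed_list_items_spec : Claim_equal_get_bracketed_list_items := by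
  intro split_text split_chars _
  unfold Spec_get_bracketed_list_items get_bracketed_list_items get_bracketed_list_items_alt
  set T := split_text.toList with hT
  obtain ⟨s, rest, hsp⟩ : ∃ s rest, pvSplit T (-1) = s :: rest := by
    cases hx : pvSplit T (-1) with
    | nil => exact absurd hx (pvSplit_ne_nil T (-1))
    | cons a l => exact ⟨a, l, rfl⟩
  have hsegs : pvSegsB T (pvCutsB T (-1) 0) 0 = pvSplit T (-1) :=
    pvB_eq T (-1) 0 T (by simp)
  have hA : pvLoopA T (-1) [] [] = pvPack [] (pvCollect s :: rest.map pvCollect) := by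
    simpa using pvA_eq T (-1) [] [] s rest hsp
  have hmap : pvCollect s :: rest.map pvCollect = (pvSplit T (-1)).map pvCollect := by
    rw [hsp]; rfl
  rw [hA, hmap]
  rw [pvPack_eq ((pvSplit T (-1)).map pvCollect) [] (by simp [hsp])]
  simp only [List.nil_append, hsegs]
  rw [pvCollect_getLastD]
  have hcond : ((pvSplit T (-1)).getLastD []).any (fun c => !(pvBr.contains c)) = true
      ↔ ¬ pvCollect ((pvSplit T (-1)).getLastD []) = ([] : List Char) := by
    rw [List.any_eq_true]
    simp only [pvCollect, List.filter_eq_nil_iff, not_forall]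
    constructor
    · rintro ⟨x, hx, hp⟩; exact ⟨x, hx, not_not_intro hp⟩
    · rintro ⟨x, hx, hp⟩; exact ⟨x, hx, not_not.mp hp⟩
  by_cases hc : pvCollect ((pvSplit T (-1)).getLastD []) = ([] : List Char)
  · have : ¬ ((pvSplit T (-1)).getLastD []).any (fun c => !(pvBr.contains c)) = true := by
      rw [hcond]; exact fun h => h hc
    simp only [this, hc, if_true]
    rw [List.map_map]; rfl
  · have : ((pvSplit T (-1)).getLastD []).any (fun c => !(pvBr.contains c)) = true := by
      rw [hcond]; exact hc
    simp only [this, if_true, hc, if_false]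
    rw [List.map_map]; rfl
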